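-- pv_equiv track=rewrite | github.com/D10f/python-scripts | ciphers/utils/freq_analysis.py | get_letter_at_interval
-- ===== SOURCE A (Python) =====
-- def get_letter_at_interval(text, interval):
--     '''
--     Given a string of text and a number, it will return a list of strings
--     containing letters at a specified interval. Starting at index 0 and repeat
--     at index 1, index 2, index n...
--     '''
--
--     letters = []
--
--     # Extract the nth letter from text starting at indexes 0, 1, 2, ...n
--     for i in range(interval):
--
--         current_index_string = []
--         # Extract the nth letter from text at interval specified
--         for j in range(i, len(text), interval):
--             current_index_string.append(text[j])
--         letters.append(''.join(current_index_string))
--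
--     return letters
-- ===== SOURCE B (Python) =====
-- def get_letter_at_interval(text, interval):
--     '''
--     Given a string of text and a number, it will return a list of strings
--     containing letters at a specified interval. Starting at index 0 and repeat
--     at index 1, index 2, index n...
--     '''
--     if interval <= 0:
--         return []
--     buckets = [[] for _ in range(interval)]
--     for idx, ch in enumerate(text):
--         buckets[idx % interval].append(ch)
--     return [''.join(b) for b in buckets]
-- ===== Notes on version B (the rewrite author's own statement) =====
-- stated objective: simpler
-- what changed: Replaces the nested offset/step loops (one indexed scan of text per column) by a single forward pass over enumerate(text) that drops each character into bucket idx % interval.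
import Mathlib
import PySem

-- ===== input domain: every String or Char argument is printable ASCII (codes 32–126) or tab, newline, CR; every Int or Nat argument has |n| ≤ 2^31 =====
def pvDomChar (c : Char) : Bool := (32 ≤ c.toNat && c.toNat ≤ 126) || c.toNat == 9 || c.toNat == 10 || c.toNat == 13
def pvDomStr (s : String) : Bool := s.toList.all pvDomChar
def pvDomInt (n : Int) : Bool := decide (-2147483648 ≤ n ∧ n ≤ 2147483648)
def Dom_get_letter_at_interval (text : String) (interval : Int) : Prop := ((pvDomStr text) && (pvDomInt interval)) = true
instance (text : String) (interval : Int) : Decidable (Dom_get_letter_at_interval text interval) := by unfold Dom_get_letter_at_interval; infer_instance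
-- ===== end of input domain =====

-- B replaces A's nested offset/step column loops by one forward pass bucketing each
-- character at index idx into bucket idx % interval (objective: simpler, same cost).

-- ===== PORT A =====
-- Inner loop index j ∈ range(i, len(text), interval) with 0 ≤ i is always in range,
-- so pyGetD is exact here; ''.join of the appended one-char strings is String.ofList
-- of the collected characters.
def get_letter_at_interval (text : String) (interval : Int) : List String :=
  (PySem.List.pyRange 0 interval 1).foldl
    (fun letters i =>
      letters ++ [String.ofList
        ((PySem.List.pyRange i (text.toList.length : Int) interval).foldl
          (fun acc j => acc ++ [PySem.List.pyGetD text.toList j ' ']) [])])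
    []

-- ===== PORT B =====
-- buckets[idx % interval].append(ch) is a read-modify-write of bucket idx % interval,
-- whose index is always in range (0 < interval), so pySetD/pyGetD are exact here.
def get_letter_at_interval_alt (text : String) (interval : Int) : List String :=
  if interval ≤ 0 then []
  else
    ((PySem.List.enumerate text.toList 0).foldl
      (fun bs p =>
        PySem.List.pySetD bs (PySem.Int.mod p.1 interval)
          (PySem.List.pyGetD bs (PySem.Int.mod p.1 interval) [] ++ [p.2]))
      (List.replicate interval.toNat [])).map String.ofList

-- ===== PRECONDITION & SPEC =====
def Spec_get_letter_at_interval (text : String) (interval : Int) (out : List String) : Prop := out = get_letter_at_interval_alt text interval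
instance (text : String) (interval : Int) (out : List String) : Decidable (Spec_get_letter_at_interval text interval out) := by unfold Spec_get_letter_at_interval; infer_instance

-- ===== CLAIM (what is proved, stated in full; the proofs are below) =====
def Claim_equal_get_letter_at_interval : Prop := ∀ (text : String) (interval : Int), Dom_get_letter_at_interval text interval → Spec_get_letter_at_interval text interval (get_letter_at_interval text interval)

-- ===== LEMMAS AND PROOFS =====

-- The column of characters of l at indices i, i+s, i+2s, … (exactly A's inner loop as a map).
def pvCol (s i : Int) (l : List Char) : List Char :=
  (PySem.List.pyRange i (l.length : Int) s).map (fun j => PySem.List.pyGetD l j ' ')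

theorem pvRange_pos_nil {a b s : Int} (hs : 0 < s) (hba : b ≤ a) :
    PySem.List.pyRange a b s = [] := by
  rw [PySem.List.pyRange_of_pos a b hs, if_neg (by omega)]
  simp

theorem pvRange_pos_cons {a b s : Int} (hs : 0 < s) (hab : a < b) :
    PySem.List.pyRange a b s = a :: PySem.List.pyRange (a + s) b s := by
  rw [PySem.List.pyRange_of_pos a b hs, PySem.List.pyRange_of_pos (a + s) b hs, if_pos hab]
  have hnum : b - a + s - 1 = (b - a - 1) + 1 * s := by ring
  have hdiv : (b - a + s - 1) / s = (b - a - 1) / s + 1 := by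
    rw [hnum, Int.add_mul_ediv_right _ _ (ne_of_gt hs)]
  have ht0 : 0 ≤ (b - a - 1) / s := Int.ediv_nonneg (by omega) hs.le
  have hN : ((b - a + s - 1) / s).toNat = ((b - a - 1) / s).toNat + 1 := by
    rw [hdiv]; omega
  rw [hN]
  by_cases hlt : a + s < b
  · rw [if_pos hlt]
    have : b - (a + s) + s - 1 = b - a - 1 := by ring
    rw [this, List.range_succ_eq_map]
    simp only [List.map_cons, List.map_map]
    congr 1
    · push_cast; ring
    · apply List.map_congr_left
      intro k _
      simp only [Function.comp_apply]
      push_cast [Nat.succ_eq_add_one]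
      ring
  · rw [if_neg hlt]
    have hz : (b - a - 1) / s = 0 :=
      Int.ediv_eq_zero_of_lt (by omega) (by omega)
    rw [hz]
    simp

-- Residue characterisation: for 0 ≤ i < n and 0 ≤ L, i = L % n ↔ i ≤ L ∧ n ∣ L - i.
theorem pvResidue {L i n : Int} (hn : 0 < n) (h0 : 0 ≤ i) (hi : i < n) (hL : 0 ≤ L) :
    (i ≤ L ∧ (L - i) % n = 0) ↔ L % n = i := by
  constructor
  · rintro ⟨hle, hmod⟩
    obtain ⟨q, hq⟩ := Int.dvd_of_emod_eq_zero hmod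
    have hiq : i + n * q = L := by omega
    calc L % n = (i + n * q) % n := by rw [hiq]
      _ = i % n := Int.add_mul_emod_self_left i n q
      _ = i := Int.emod_eq_of_lt h0 hi
  · intro hmod
    have hdef : L % n = L - n * (L / n) := Int.emod_def L n
    have hq0 : 0 ≤ L / n := Int.ediv_nonneg hL hn.le
    constructor
    · nlinarith [hdef, hmod, hq0]
    · rw [← hmod, hdef]
      have : L - (L - n * (L / n)) = n * (L / n) := by ring
      rw [this, Int.mul_emod_right]

-- Appending one character to l extends exactly the column of its residue class.
theorem pvCol_append (s : Int) (hs : 0 < s) (l : List Char) (c : Char) :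
    ∀ (k : Nat) (i : Int), 0 ≤ i → ((l.length : Int) + 1 - i).toNat ≤ k →
    pvCol s i (l ++ [c]) =
      pvCol s i l ++
        (if i ≤ (l.length : Int) ∧ ((l.length : Int) - i) % s = 0 then [c] else []) := by
  intro k
  induction k with
  | zero =>
    intro i h0 hk
    have hgt : (l.length : Int) + 1 ≤ i := by omega
    simp only [pvCol, List.length_append, List.length_cons, List.length_nil]
    rw [pvRange_pos_nil hs (by push_cast; omega), pvRange_pos_nil hs (by omega)]
    rw [if_neg (by rintro ⟨h1, _⟩; omega)]
    simp
  | succ k ih =>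
    intro i h0 hk
    rcases lt_trichotomy i (l.length : Int) with hlt | heq | hgt
    · simp only [pvCol, List.length_append, List.length_cons, List.length_nil]
      rw [pvRange_pos_cons hs (by push_cast; omega), pvRange_pos_cons hs hlt]
      simp only [List.map_cons]
      have hrec := ih (i + s) (by omega) (by omega)
      simp only [pvCol, List.length_append, List.length_cons, List.length_nil] at hrec
      rw [hrec]
      have hg : PySem.List.pyGetD (l ++ [c]) i ' ' = PySem.List.pyGetD l i ' ' := by
        rw [PySem.List.pyGetD_eq_getElem _ ' ' h0 (by simp; omega),
            PySem.List.pyGetD_eq_getElem _ ' ' h0 (by omega)]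
        exact List.getElem_append_left _
      have hiff : (i + s ≤ (l.length : Int) ∧ ((l.length : Int) - (i + s)) % s = 0)
          ↔ (i ≤ (l.length : Int) ∧ ((l.length : Int) - i) % s = 0) := by
        constructor
        · rintro ⟨h1, h2⟩
          refine ⟨by omega, ?_⟩
          have he : (l.length : Int) - i = ((l.length : Int) - (i + s)) + s * 1 := by ring
          rw [he, Int.add_mul_emod_self_left, h2]
        · rintro ⟨h1, h2⟩
          have hdvd : s ∣ (l.length : Int) - i := Int.dvd_of_emod_eq_zero h2
          have hle : s ≤ (l.length : Int) - i := Int.le_of_dvd (by omega) hdvd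
          refine ⟨by omega, ?_⟩
          have he : (l.length : Int) - (i + s) = ((l.length : Int) - i) + s * (-1) := by ring
          rw [he, Int.add_mul_emod_self_left, h2]
      have hite : (if i + s ≤ (l.length : Int) ∧ ((l.length : Int) - (i + s)) % s = 0
              then [c] else ([] : List Char))
          = (if i ≤ (l.length : Int) ∧ ((l.length : Int) - i) % s = 0 then [c] else []) :=
        if_congr hiff rfl rfl
      rw [hite, hg, List.cons_append]
    · simp only [pvCol, List.length_append, List.length_cons, List.length_nil]
      rw [pvRange_pos_cons hs (by push_cast; omega),
          pvRange_pos_nil hs (le_of_eq heq.symm),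
          pvRange_pos_nil hs (by push_cast; omega)]
      rw [if_pos ⟨le_of_eq heq, by rw [← heq]; simp⟩]
      simp only [List.map_cons, List.map_nil, List.nil_append]
      congr 1
      rw [PySem.List.pyGetD_eq_getElem _ ' ' h0 (by simp; omega)]
      have hi : i.toNat = l.length := by omega
      simp [hi]
    · simp only [pvCol, List.length_append, List.length_cons, List.length_nil]
      rw [pvRange_pos_nil hs (by push_cast; omega), pvRange_pos_nil hs (by omega)]
      rw [if_neg (by rintro ⟨h1, _⟩; omega)]
      simp

-- B's bucket fold computes exactly the list of columns.
theorem pvBuckets_eq (interval : Int) (hpos : 0 < interval) (l : List Char) :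
    (PySem.List.enumerate l 0).foldl
      (fun bs p =>
        PySem.List.pySetD bs (PySem.Int.mod p.1 interval)
          (PySem.List.pyGetD bs (PySem.Int.mod p.1 interval) [] ++ [p.2]))
      (List.replicate interval.toNat [])
    = (List.range interval.toNat).map (fun i : Nat => pvCol interval (i : Int) l) := by
  induction l using List.reverseRecOn with
  | nil =>
    simp only [PySem.List.enumerate_nil, List.foldl_nil]
    apply List.ext_getElem
    · simp
    · intro j h1 h2
      simp only [List.getElem_replicate, List.getElem_map, List.getElem_range]
      rw [pvCol]
      simp only [List.length_nil, Nat.cast_zero]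
      rw [pvRange_pos_nil hpos (by omega)]
      simp
  | append_singleton l c ih =>
    rw [PySem.List.enumerate_append, List.foldl_append, ih]
    simp only [PySem.List.enumerate_cons, PySem.List.enumerate_nil, List.foldl_cons,
      List.foldl_nil, zero_add]
    have hn : interval = ((interval.toNat : Nat) : Int) := (Int.toNat_of_nonneg hpos.le).symm
    set n : Nat := interval.toNat with hn'
    have hn0 : 0 < n := by omega
    have hmod : PySem.Int.mod ((l.length : Nat) : Int) interval = ((l.length % n : Nat) : Int) := by
      rw [hn, PySem.Int.mod_natCast]
    rw [hmod, PySem.List.pySetD_natCast, PySem.List.pyGetD_natCast]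
    have hmlt : l.length % n < n := Nat.mod_lt _ hn0
    apply List.ext_getElem
    · simp
    · intro j hj1 hj2
      simp only [List.length_set, List.length_map, List.length_range] at hj1
      have hgd : (List.map (fun i : Nat => pvCol interval (i : Int) l) (List.range n)).getD (l.length % n) []
          = pvCol interval ((l.length % n : Nat) : Int) l := by
        rw [List.getD_eq_getElem _ _ (by simp [hmlt])]
        simp
      rw [List.getElem_set]
      simp only [List.getElem_map, List.getElem_range]
      rw [pvCol_append interval hpos l c ((l.length : Int) + 1 - j).toNat (↑j) (by omega) le_rfl]
      rw [if_congr (pvResidue (by omega) (by omega) (by omega) (by omega)) rfl rfl]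
      have hcond : ((l.length : Int) % interval = (j : Int)) ↔ (l.length % n = j) := by
        rw [hn, ← Int.natCast_mod]
        exact Nat.cast_inj
      rw [if_congr hcond rfl rfl]
      by_cases hje : l.length % n = j
      · rw [if_pos hje, if_pos hje, hgd, hje]
      · rw [if_neg hje, if_neg hje, List.append_nil]

-- ===== VERDICT (by name: the statement is the Claim_ definition above) =====
theorem get_letter_at_interval_spec : Claim_equal_get_letter_at_interval := by
  intro text interval _
  unfold Spec_get_letter_at_interval get_letter_at_interval get_letter_at_interval_alt
  by_cases h : interval ≤ 0
  · rw [if_pos h, PySem.List.pyRange_one_eq_nil h]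
    simp
  · rw [if_neg h]
    have hpos : 0 < interval := by omega
    rw [pvBuckets_eq interval hpos text.toList]
    rw [PySem.List.foldl_append_singleton_eq_map
      (fun i => String.ofList
        ((PySem.List.pyRange i (text.toList.length : Int) interval).foldl
          (fun acc j => acc ++ [PySem.List.pyGetD text.toList j ' ']) []))]
    simp only [PySem.List.foldl_append_singleton_eq_map, List.nil_append, List.nil_append]
    rw [PySem.List.pyRange_one 0 interval]
    simp only [List.map_map, Int.sub_zero]
    apply List.map_congr_left
    intro k _
    simp only [Function.comp_apply, zero_add]
    rfl
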